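-- pv_equiv track=rewrite | github.com/david5010/trade-tracker | heuristic_tests/filters.py | flag_trades
-- ===== SOURCE A (Python) =====
-- def flag_trades(combos):
--     seen = set()
--     for inner_tuple in combos:
--         for num in inner_tuple:
--             if num in seen:
--                 return True  # Found a repeated integer
--             seen.add(num)
--     return False  # No repetitions found
-- ===== SOURCE B (Python) =====
-- def flag_trades(combos):
--     flat = sorted(n for t in combos for n in t)
--     return any(a == b for a, b in zip(flat, flat[1:]))
-- ===== Notes on version B (the rewrite author's own statement) =====
-- stated objective: alternative
-- what changed: Replaces the hash-set early-exit membership loop with sort-then-scan: sort the flattened numbers and report whether any two adjacent elements are equal (in a sorted list every duplicate is adjacent).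
import Mathlib
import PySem

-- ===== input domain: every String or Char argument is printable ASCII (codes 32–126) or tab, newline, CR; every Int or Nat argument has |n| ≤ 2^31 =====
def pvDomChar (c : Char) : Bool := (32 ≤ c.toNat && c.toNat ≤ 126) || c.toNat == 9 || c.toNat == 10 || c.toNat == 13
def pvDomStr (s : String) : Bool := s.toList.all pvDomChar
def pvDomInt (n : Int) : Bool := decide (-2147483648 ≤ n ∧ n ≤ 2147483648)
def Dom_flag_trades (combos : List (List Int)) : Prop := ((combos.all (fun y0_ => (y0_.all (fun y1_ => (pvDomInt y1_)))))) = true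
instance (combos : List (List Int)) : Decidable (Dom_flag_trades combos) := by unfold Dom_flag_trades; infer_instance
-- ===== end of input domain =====

-- B replaces the hash-set early-exit membership loop by sort-then-scan: sort the flattened
-- numbers and check whether any two adjacent elements are equal (alternative algorithm, same task).


-- ===== PORT A =====
-- inner 'for num in inner_tuple' loop: none = early 'return True', some seen' = loop finished
def flagInnerA (seen : PySem.Set Int) : List Int → Option (PySem.Set Int)
  | [] => some seen
  | n :: ns =>
    if PySem.Set.contains seen n then none
    else flagInnerA (PySem.Set.add seen n) ns

-- outer 'for inner_tuple in combos' loop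
def flagOuterA (seen : PySem.Set Int) : List (List Int) → Bool
  | [] => false
  | t :: ts =>
    match flagInnerA seen t with
    | none => true
    | some seen' => flagOuterA seen' ts

def flag_trades (combos : List (List Int)) : Bool := flagOuterA PySem.Set.empty combos

-- ===== PORT B =====
-- 'any(a == b for a, b in zip(flat, flat[1:]))'
def anyAdjEq : List (Int × Int) → Bool
  | [] => false
  | (a, b) :: rest => (a == b) || anyAdjEq rest

def flag_trades_alt (combos : List (List Int)) : Bool :=
  let flat := PySem.List.sorted (combos.flatMap (fun t => t)) (fun x => x) false
  anyAdjEq (flat.zip (flat.drop 1))   -- flat[1:] = drop 1 (exact on lists)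

-- ===== PRECONDITION & SPEC =====
def Spec_flag_trades (combos : List (List Int)) (out : Bool) : Prop := out = flag_trades_alt combos
instance (combos : List (List Int)) (out : Bool) : Decidable (Spec_flag_trades combos out) := by unfold Spec_flag_trades; infer_instance

-- ===== CLAIM =====
def Claim_equal_flag_trades : Prop := ∀ (combos : List (List Int)), Dom_flag_trades combos → Spec_flag_trades combos (flag_trades combos)

-- ===== LEMMAS AND PROOFS =====

theorem flagInnerA_eq (seen : List Int) (t : List Int) (h : seen.Nodup) :
    flagInnerA seen t = if (seen ++ t).Nodup then some (seen ++ t) else none := by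
  induction t generalizing seen with
  | nil => simp [flagInnerA, h]
  | cons n ns ih =>
    by_cases hn : n ∈ seen
    · have : ¬ (seen ++ n :: ns).Nodup := by
        intro hnd
        exact (List.disjoint_of_nodup_append hnd) hn (by simp)
      simp [flagInnerA, PySem.Set.contains, hn, this]
    · have hadd : PySem.Set.add seen n = seen ++ [n] := by
        simp [PySem.Set.add, PySem.Set.contains, hn]
      have hnd : (seen ++ [n]).Nodup := by
        refine List.Nodup.append h (List.nodup_singleton n) ?_
        intro a ha hb
        simp only [List.mem_singleton] at hb
        exact hn (hb ▸ ha)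
      rw [flagInnerA, if_neg (by simp [PySem.Set.contains, hn]), hadd, ih _ hnd]
      simp [List.append_assoc]

theorem flagOuterA_eq (seen : List Int) (ts : List (List Int)) (h : seen.Nodup) :
    flagOuterA seen ts = !decide ((seen ++ ts.flatMap (fun t => t)).Nodup) := by
  induction ts generalizing seen with
  | nil => simp [flagOuterA, h]
  | cons t ts ih =>
    rw [flagOuterA, flagInnerA_eq seen t h]
    by_cases hnd : (seen ++ t).Nodup
    · simp only [hnd, if_true, ih _ hnd, List.flatMap_cons, List.append_assoc]
    · have : ¬ (seen ++ (t :: ts).flatMap (fun t => t)).Nodup := by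
        intro hbig
        exact hnd (hbig.sublist (by simp))
      simp only [if_neg hnd]
      rw [Bool.eq_iff_iff]
      simpa using this

-- in a ≤-sorted list, no adjacent pair is equal iff the list has no duplicates
theorem anyAdjEq_sorted (l : List Int) (hs : l.Pairwise (· ≤ ·)) :
    anyAdjEq (l.zip (l.drop 1)) = !decide l.Nodup := by
  induction l with
  | nil => simp [anyAdjEq]
  | cons a t ih =>
    match t, hs with
    | [], _ => simp [anyAdjEq]
    | b :: r, hs =>
      have hpair := List.pairwise_cons.mp hs
      have hab : a ≤ b := hpair.1 b (by simp)
      have hbr : ∀ x ∈ r, b ≤ x := (List.pairwise_cons.mp hpair.2).1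
      rw [show ((a :: b :: r).zip ((a :: b :: r).drop 1)) = (a, b) :: ((b :: r).zip ((b :: r).drop 1)) by simp,
        anyAdjEq, ih hpair.2]
      by_cases heq : a = b
      · have : ¬ (a :: b :: r).Nodup := by
          intro h
          exact (List.nodup_cons.mp h).1 (by simp [heq])
        simp [heq]
      · have hmem : a ∉ b :: r := by
          intro hm
          rcases List.mem_cons.mp hm with h | h
          · exact heq h
          · exact heq (le_antisymm hab (le_trans (hbr a h) (le_refl a)) )
        have : (a :: b :: r).Nodup ↔ (b :: r).Nodup := by
          constructor
          · exact fun h => (List.nodup_cons.mp h).2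
          · exact fun h => List.nodup_cons.mpr ⟨hmem, h⟩
        have hb : (a == b) = false := by simp [heq]
        rw [hb, Bool.false_or, Bool.eq_iff_iff]
        simp [this]

-- ===== VERDICT =====
theorem flag_trades_spec : Claim_equal_flag_trades := by
  intro combos _
  show flag_trades combos = flag_trades_alt combos
  rw [flag_trades, flag_trades_alt,
    flagOuterA_eq PySem.Set.empty combos (by simp [PySem.Set.empty])]
  simp only [PySem.Set.empty, List.nil_append]
  rw [anyAdjEq_sorted _ (PySem.List.sorted_pairwise _ _)]
  congr 1
  exact decide_eq_decide.mpr ((PySem.List.sorted_perm _ _ _).nodup_iff.symm)
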